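-- pv_equiv track=rewrite | github.com/rcaalves/linkexperiments | link_test_parse_mote_output.py | fill_with_none_and_cap
-- ===== SOURCE A (Python) =====
-- def fill_with_none_and_cap(seq):
--   if not len(seq): return []
--
--   prev = seq[0]
--   seq_temp = [prev]
--   for i in seq[1:]:
--     if i < prev:
--       break
--
--     seq_temp += [None] * (i - prev - 1)
--     seq_temp += [i]
--
--     prev = i
--   return seq_temp
-- ===== SOURCE B (Python) =====
-- def fill_with_none_and_cap(seq):
--   if not seq:
--     return []
--   # pass 1: collect the non-decreasing prefix, stopping at the first decrease
--   prefix = [seq[0]]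
--   for i in seq[1:]:
--     if i < prefix[-1]:
--       break
--     prefix.append(i)
--   # pass 2: expand each consecutive pair into its gap of Nones plus the value
--   out = [prefix[0]]
--   for a, b in zip(prefix, prefix[1:]):
--     out += [None] * (b - a - 1)
--     out.append(b)
--   return out
-- ===== Notes on version B (the rewrite author's own statement) =====
-- stated objective: alternative
-- what changed: Split A's single accumulate-while-expanding loop into two passes: first collect the non-decreasing prefix (stop at first decrease), then expand consecutive pairs of that prefix into gap Nones via zip.
import Mathlib
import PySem

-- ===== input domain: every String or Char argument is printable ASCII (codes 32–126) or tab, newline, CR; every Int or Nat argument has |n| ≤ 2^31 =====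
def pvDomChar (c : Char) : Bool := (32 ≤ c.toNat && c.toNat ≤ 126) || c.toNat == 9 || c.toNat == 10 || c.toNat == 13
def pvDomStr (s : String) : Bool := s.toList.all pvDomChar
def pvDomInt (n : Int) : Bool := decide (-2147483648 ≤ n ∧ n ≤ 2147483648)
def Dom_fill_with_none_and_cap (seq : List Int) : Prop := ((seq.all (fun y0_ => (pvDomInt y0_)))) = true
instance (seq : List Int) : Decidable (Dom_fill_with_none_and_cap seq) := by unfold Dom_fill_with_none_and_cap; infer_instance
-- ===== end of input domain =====

-- ===== PORT A =====
-- loop over seq[1:] carrying prev and the accumulated seq_temp, exactly as A does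
def fwncLoop (prev : Int) (acc : List (Option Int)) : List Int → List (Option Int)
  | [] => acc
  | i :: rest =>
    if i < prev then acc
    else fwncLoop i (acc ++ List.replicate (i - prev - 1).toNat none ++ [some i]) rest

def fill_with_none_and_cap (seq : List Int) : List (Option Int) :=
  match seq with
  | [] => []
  | prev :: rest => fwncLoop prev [some prev] rest

-- ===== PORT B =====
-- pass 1: the non-decreasing tail of the prefix after `last`
def fwncTake (last : Int) : List Int → List Int
  | [] => []
  | i :: rest => if i < last then [] else i :: fwncTake i rest

-- pass 2: expand each consecutive pair (a, b) into [None]*(b-a-1) ++ [b]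
def fwncExpand : List (Int × Int) → List (Option Int)
  | [] => []
  | (a, b) :: rest => List.replicate (b - a - 1).toNat none ++ [some b] ++ fwncExpand rest

def fill_with_none_and_cap_alt (seq : List Int) : List (Option Int) :=
  match seq with
  | [] => []
  | h :: t =>
    let p := h :: fwncTake h t
    some h :: fwncExpand (p.zip p.tail)

-- ===== PRECONDITION & SPEC =====
def Spec_fill_with_none_and_cap (seq : List Int) (out : List (Option Int)) : Prop := out = fill_with_none_and_cap_alt seq
instance (seq : List Int) (out : List (Option Int)) : Decidable (Spec_fill_with_none_and_cap seq out) := by unfold Spec_fill_with_none_and_cap; infer_instance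

-- ===== CLAIM (what is proved, stated in full; the proofs are below) =====
def Claim_equal_fill_with_none_and_cap : Prop := ∀ (seq : List Int), Dom_fill_with_none_and_cap seq → Spec_fill_with_none_and_cap seq (fill_with_none_and_cap seq)

-- ===== LEMMAS AND PROOFS =====

-- ===== VERDICT (by name: the statement is the Claim_ definition above) =====
theorem fwnc_loop_eq (t : List Int) : ∀ (prev : Int) (acc : List (Option Int)),
    fwncLoop prev acc t =
      acc ++ fwncExpand ((prev :: fwncTake prev t).zip (fwncTake prev t)) := by
  induction t with
  | nil => intro prev acc; simp [fwncLoop, fwncTake, fwncExpand]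
  | cons i rest ih =>
    intro prev acc
    by_cases h : i < prev
    · simp [fwncLoop, fwncTake, h, fwncExpand]
    · simp only [fwncLoop, fwncTake, if_neg h, List.zip_cons_cons, fwncExpand, ih]
      simp [List.append_assoc]

theorem fill_with_none_and_cap_spec : Claim_equal_fill_with_none_and_cap := by
  intro seq _
  unfold Spec_fill_with_none_and_cap
  cases seq with
  | nil => rfl
  | cons h t =>
    simp only [fill_with_none_and_cap, fill_with_none_and_cap_alt, fwnc_loop_eq]
    rfl
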